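-- pv_equiv track=rewrite | github.com/ook-lab/document-management-system | shared/pipeline/archive/stage_f_visual.py | _merge_boundary_candidates
-- ===== SOURCE A (Python) =====
-- from typing import Dict, Any, Optional, List, Tuple
--
-- def _merge_boundary_candidates(
--
--     gaps: List[tuple],
--     lines: List[int],
--     valleys: List[tuple],
--     max_count: int
-- ) -> List[int]:
--     """空白・罫線・密度谷の候補を統合（重複除去・優先順位付き）"""
--     candidates = []
--     used_positions = set()
--     MERGE_THRESHOLD = 30  # この距離以内は同一境界とみなす
--
--     def add_if_new(pos):
--         for used in used_positions:
--             if abs(pos - used) < MERGE_THRESHOLD: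
--                 return False
--         used_positions.add(pos)
--         candidates.append(pos)
--         return True
--
--     # 優先1: 空白ガター（最も信頼性が高い）
--     for pos, width in gaps:
--         if len(candidates) >= max_count:
--             break
--         add_if_new(pos)
--
--     # 優先2: 罫線
--     for pos in lines:
--         if len(candidates) >= max_count:
--             break
--         add_if_new(pos)
--
--     # 優先3: 密度谷
--     for pos, depth in valleys:
--         if len(candidates) >= max_count:
--             break
--         add_if_new(pos)
--
--     return sorted(candidates)
-- ===== SOURCE B (Python) =====
-- def _merge_boundary_candidates(
--     gaps,
--     lines,
--     valleys,
--     max_count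
-- ):
--     """Bucket-dict variant: accepted positions are pairwise >= 30 apart, so each
--     bucket pos//30 holds at most one of them and a neighbour within 30 can only
--     live in buckets b-1, b, b+1 — O(1) dedup test per candidate."""
--     T = 30
--     buckets = {}
--     out = []
--     for pos in [p for p, _w in gaps] + list(lines) + [p for p, _d in valleys]:
--         if len(out) >= max_count:
--             break
--         b = pos // T
--         if any(k in buckets and abs(pos - buckets[k]) < T for k in (b - 1, b, b + 1)):
--             continue
--         buckets[b] = pos
--         out.append(pos)
--     return sorted(out)
-- ===== Notes on version B (the rewrite author's own statement) =====
-- stated objective: faster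
-- what changed: B replaces A's per-candidate linear scan over every accepted position with a bucket dict keyed by pos//30 (accepted positions are pairwise >= 30 apart, so a neighbour within 30 can only sit in buckets b-1, b, b+1) and fuses A's three priority loops into one loop over the concatenated candidate stream.
import Mathlib
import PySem

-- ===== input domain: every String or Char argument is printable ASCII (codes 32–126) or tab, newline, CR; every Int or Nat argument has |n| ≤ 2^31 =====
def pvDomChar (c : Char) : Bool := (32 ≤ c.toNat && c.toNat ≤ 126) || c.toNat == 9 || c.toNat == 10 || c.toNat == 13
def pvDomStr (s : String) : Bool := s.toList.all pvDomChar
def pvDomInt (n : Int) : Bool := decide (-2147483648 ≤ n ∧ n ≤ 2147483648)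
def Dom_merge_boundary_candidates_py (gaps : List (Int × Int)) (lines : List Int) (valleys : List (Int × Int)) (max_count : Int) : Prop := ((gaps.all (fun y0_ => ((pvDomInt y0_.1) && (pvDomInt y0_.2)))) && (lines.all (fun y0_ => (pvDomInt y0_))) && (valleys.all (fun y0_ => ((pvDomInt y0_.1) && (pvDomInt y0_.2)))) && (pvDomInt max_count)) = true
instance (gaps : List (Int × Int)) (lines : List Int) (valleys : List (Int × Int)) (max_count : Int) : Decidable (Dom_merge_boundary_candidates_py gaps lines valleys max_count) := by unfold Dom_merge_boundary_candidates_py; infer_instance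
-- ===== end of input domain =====

-- B replaces A's scan over every used position by a bucket dict keyed by pos // 30
-- (a neighbour within 30 can only live in buckets b-1, b, b+1), one loop over the
-- concatenated candidate stream. Return-value equivalence; no argument is mutated.

-- ===== PORT A =====
-- add_if_new: scan every used position; if one is within 30, reject, else record pos.
def pvAddIfNew (st : List Int × PySem.Set Int) (pos : Int) : List Int × PySem.Set Int :=
  if st.2.any (fun u => decide (|pos - u| < 30)) then st
  else (st.1 ++ [pos], PySem.Set.add st.2 pos)

-- one of A's three priority loops: break once len(candidates) >= max_count
def pvALoop (mc : Int) : List Int → (List Int × PySem.Set Int) → List Int × PySem.Set Int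
  | [], st => st
  | p :: rest, st =>
    if mc ≤ (st.1.length : Int) then st
    else pvALoop mc rest (pvAddIfNew st p)

def merge_boundary_candidates_py (gaps : List (Int × Int)) (lines : List Int) (valleys : List (Int × Int)) (max_count : Int) : List Int :=
  let st0 : List Int × PySem.Set Int := ([], PySem.Set.empty)
  let st1 := pvALoop max_count (gaps.map Prod.fst) st0
  let st2 := pvALoop max_count lines st1
  let st3 := pvALoop max_count (valleys.map Prod.fst) st2
  PySem.List.sorted st3.1 (fun x => x) false

-- ===== PORT B =====
-- 'k in buckets and abs(pos - buckets[k]) < T' for one candidate bucket key k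
def pvBucketHit (d : PySem.Dict Int Int) (p : Int) (k : Int) : Bool :=
  match d.get? k with
  | some u => decide (|p - u| < 30)
  | none => false

-- B's single loop over the concatenated candidate stream
def pvAltLoop (mc : Int) : List Int → PySem.Dict Int Int → List Int → List Int
  | [], _, out => out
  | p :: rest, d, out =>
    if mc ≤ (out.length : Int) then out
    else
      let b := PySem.Int.floordiv p 30
      if [b - 1, b, b + 1].any (pvBucketHit d p)
      then pvAltLoop mc rest d out
      else pvAltLoop mc rest (d.insert b p) (out ++ [p])

def merge_boundary_candidates_py_alt (gaps : List (Int × Int)) (lines : List Int) (valleys : List (Int × Int)) (max_count : Int) : List Int :=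
  PySem.List.sorted
    (pvAltLoop max_count (gaps.map Prod.fst ++ lines ++ valleys.map Prod.fst) PySem.Dict.empty [])
    (fun x => x) false

-- ===== PRECONDITION & SPEC =====
def Spec_merge_boundary_candidates_py (gaps : List (Int × Int)) (lines : List Int) (valleys : List (Int × Int)) (max_count : Int) (out : List Int) : Prop := out = merge_boundary_candidates_py_alt gaps lines valleys max_count
instance (gaps : List (Int × Int)) (lines : List Int) (valleys : List (Int × Int)) (max_count : Int) (out : List Int) : Decidable (Spec_merge_boundary_candidates_py gaps lines valleys max_count out) := by unfold Spec_merge_boundary_candidates_py; infer_instance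

-- ===== CLAIM (what is proved, stated in full; the proofs are below) =====
def Claim_equal_merge_boundary_candidates_py : Prop := ∀ (gaps : List (Int × Int)) (lines : List Int) (valleys : List (Int × Int)) (max_count : Int), Dom_merge_boundary_candidates_py gaps lines valleys max_count → Spec_merge_boundary_candidates_py gaps lines valleys max_count (merge_boundary_candidates_py gaps lines valleys max_count)

-- ===== LEMMAS AND PROOFS =====

-- once the threshold is reached, A's loop returns its state unchanged
lemma pvALoop_of_le (mc : Int) (ps : List Int) (st : List Int × PySem.Set Int)
    (h : mc ≤ (st.1.length : Int)) : pvALoop mc ps st = st := by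
  cases ps with
  | nil => rfl
  | cons p rest => simp only [pvALoop, if_pos h]

-- A's three loops over the pieces = one loop over the concatenated stream
lemma pvALoop_append (mc : Int) (xs ys : List Int) (st : List Int × PySem.Set Int) :
    pvALoop mc (xs ++ ys) st = pvALoop mc ys (pvALoop mc xs st) := by
  induction xs generalizing st with
  | nil => rfl
  | cons p rest ih =>
    simp only [List.cons_append, pvALoop]
    by_cases h : mc ≤ (st.1.length : Int)
    · rw [if_pos h, if_pos h, pvALoop_of_le mc ys st h]
    · rw [if_neg h, if_neg h]; exact ih _

-- two ints within 30 of each other land in adjacent 30-buckets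
lemma pvBucket_close (p u : Int) (h : -30 < p - u ∧ p - u < 30) :
    PySem.Int.floordiv p 30 - 1 ≤ PySem.Int.floordiv u 30 ∧
    PySem.Int.floordiv u 30 ≤ PySem.Int.floordiv p 30 + 1 := by
  have hp := (PySem.Int.floordiv_eq_iff_of_pos (a := p) (b := 30) (by norm_num)).mp rfl
  have hu := (PySem.Int.floordiv_eq_iff_of_pos (a := u) (b := 30) (by norm_num)).mp rfl
  constructor <;> nlinarith [hp.1, hp.2, hu.1, hu.2]

-- the loop invariant: B's out list IS A's candidates list, and B's bucket dict holds
-- exactly the members of A's used set, keyed by their 30-bucket.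
lemma pvLoop_eq (mc : Int) (ps : List Int) :
    ∀ (st : List Int × PySem.Set Int) (d : PySem.Dict Int Int),
      (∀ b u : Int, d.get? b = some u ↔ (u ∈ st.2 ∧ PySem.Int.floordiv u 30 = b)) →
      pvAltLoop mc ps d st.1 = (pvALoop mc ps st).1 := by
  induction ps with
  | nil => intro st d _; rfl
  | cons p rest ih =>
    intro st d hinv
    simp only [pvALoop, pvAltLoop]
    by_cases hbrk : mc ≤ (st.1.length : Int)
    · rw [if_pos hbrk, if_pos hbrk]
    · rw [if_neg hbrk, if_neg hbrk]
      set b := PySem.Int.floordiv p 30 with hb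
      have hnear : ([b - 1, b, b + 1].any (pvBucketHit d p) = true) ↔
          (st.2.any (fun u => decide (|p - u| < 30)) = true) := by
        simp only [List.any_eq_true, decide_eq_true_iff]
        constructor
        · rintro ⟨k, _, hk⟩
          unfold pvBucketHit at hk
          cases hd : d.get? k with
          | none => rw [hd] at hk; simp at hk
          | some u =>
            rw [hd] at hk
            exact ⟨u, ((hinv k u).mp hd).1, by simpa using hk⟩
        · rintro ⟨u, hu, habs⟩
          have habs' : -30 < p - u ∧ p - u < 30 := abs_lt.mp habs
          have hk := (hinv (PySem.Int.floordiv u 30) u).mpr ⟨hu, rfl⟩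
          have hrange := pvBucket_close p u habs'
          refine ⟨PySem.Int.floordiv u 30, ?_, ?_⟩
          · simp only [List.mem_cons]
            omega
          · unfold pvBucketHit; rw [hk]; simpa using habs
      by_cases hc : [b - 1, b, b + 1].any (pvBucketHit d p) = true
      · rw [if_pos hc]
        have : pvAddIfNew st p = st := by
          simp only [pvAddIfNew, if_pos (hnear.mp hc)]
        rw [this]
        exact ih st d hinv
      · rw [if_neg hc]
        have hAdd : pvAddIfNew st p = (st.1 ++ [p], PySem.Set.add st.2 p) := by
          simp only [pvAddIfNew]
          rw [if_neg (fun h => hc (hnear.mpr h))]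
        rw [hAdd]
        refine ih (st.1 ++ [p], PySem.Set.add st.2 p) (d.insert b p) ?_
        intro b' u
        by_cases hbb : b' = b
        · subst hbb
          rw [PySem.Dict.get?_insert_self]
          constructor
          · rintro ⟨rfl⟩
            exact ⟨(PySem.Set.mem_add _ _ _).mpr (Or.inr rfl), hb.symm⟩
          · rintro ⟨hu, hfu⟩
            rcases (PySem.Set.mem_add _ _ _).mp hu with hu' | rfl
            · -- u was already used and shares p's bucket, so |p - u| < 30: the
              -- bucket test at key b would have fired — contradiction with hc
              exfalso
              apply hc
              simp only [List.any_eq_true]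
              refine ⟨b, by simp, ?_⟩
              have hk := (hinv b u).mpr ⟨hu', hfu⟩
              unfold pvBucketHit
              rw [hk]
              have hp := (PySem.Int.floordiv_eq_iff_of_pos (a := p) (b := 30) (by norm_num)).mp hb.symm
              have hu30 := (PySem.Int.floordiv_eq_iff_of_pos (a := u) (b := 30) (by norm_num)).mp hfu
              simp only [decide_eq_true_iff]
              rw [abs_lt]
              constructor <;> nlinarith [hp.1, hp.2, hu30.1, hu30.2]
            · rfl
        · rw [PySem.Dict.get?_insert_of_ne d p hbb, hinv b' u, PySem.Set.mem_add _ _ _]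
          constructor
          · rintro ⟨hu, hfu⟩; exact ⟨Or.inl hu, hfu⟩
          · rintro ⟨hu | rfl, hfu⟩
            · exact ⟨hu, hfu⟩
            · exact absurd (by omega : b' = b) hbb

-- ===== VERDICT (by name: the statement is the Claim_ definition above) =====
theorem merge_boundary_candidates_py_spec : Claim_equal_merge_boundary_candidates_py := by
  intro gaps lines valleys mc _
  unfold Spec_merge_boundary_candidates_py merge_boundary_candidates_py merge_boundary_candidates_py_alt
  show PySem.List.sorted (pvALoop mc (valleys.map Prod.fst) (pvALoop mc lines (pvALoop mc (gaps.map Prod.fst) ([], PySem.Set.empty)))).1 (fun x => x) false = _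
  rw [← pvALoop_append, ← pvALoop_append]
  have h0 : ∀ b u : Int, (PySem.Dict.empty : PySem.Dict Int Int).get? b = some u ↔
      (u ∈ (([], PySem.Set.empty) : List Int × PySem.Set Int).2 ∧ PySem.Int.floordiv u 30 = b) := by
    intro b u
    simp [PySem.Dict.empty, PySem.Dict.get?, PySem.Set.empty]
  rw [List.append_assoc (gaps.map Prod.fst) lines (valleys.map Prod.fst)]
  exact (congrArg (fun l => PySem.List.sorted l (fun x => x) false)
    (pvLoop_eq mc (gaps.map Prod.fst ++ (lines ++ valleys.map Prod.fst)) ([], PySem.Set.empty) PySem.Dict.empty h0)).symm
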